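-- pv_equiv track=rewrite | github.com/nathanrockell5/calculating-distance-between-quadkeys | source_code/main.py | find_distance_horizontally
-- ===== SOURCE A (Python) =====
-- def find_distance_horizontally(qk1, qk2):
--     # Used to handle different length quadkeys.
--     min_len = min(len(str(qk1)), len(str(qk2)))
--
--     # Truncate either quadkey if required and reverse it.
--     qk1 = str(qk1)[:min_len][::-1]
--     qk2 = str(qk2)[:min_len][::-1]
--
--     # Initalise distance variable
--     distance = 0
--
--     for i in range(len(qk1)):
--         # qk1 is EVEN and qk2 is ODD. Left -> Right
--         if (int(qk1[i]) % 2 == 0) and (int(qk2[i]) % 2 != 0):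
--             distance += pow(2, i)
--         # qk1 is ODD and qk2 is EVEN. Right -> Left
--         elif (int(qk1[i]) % 2 != 0) and (int(qk2[i]) % 2 == 0):
--             distance -= pow(2, i)
--
--     return abs(distance)
-- ===== SOURCE B (Python) =====
-- def find_distance_horizontally(qk1, qk2):
--     s1, s2 = str(qk1), str(qk2)
--     m = min(len(s1), len(s2))
--     x1 = 0
--     for ch in s1[:m]:
--         x1 = 2 * x1 + int(ch) % 2
--     x2 = 0
--     for ch in s2[:m]:
--         x2 = 2 * x2 + int(ch) % 2
--     return abs(x1 - x2)
-- ===== Notes on version B (the rewrite author's own statement) =====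
-- stated objective: simpler
-- what changed: B replaces A's reverse-and-signed-sum-of-powers loop (branching on the parity pair and adding/subtracting pow(2,i)) by two independent Horner accumulations of the parity bits read left-to-right, returning abs(x1 - x2).
import Mathlib
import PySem

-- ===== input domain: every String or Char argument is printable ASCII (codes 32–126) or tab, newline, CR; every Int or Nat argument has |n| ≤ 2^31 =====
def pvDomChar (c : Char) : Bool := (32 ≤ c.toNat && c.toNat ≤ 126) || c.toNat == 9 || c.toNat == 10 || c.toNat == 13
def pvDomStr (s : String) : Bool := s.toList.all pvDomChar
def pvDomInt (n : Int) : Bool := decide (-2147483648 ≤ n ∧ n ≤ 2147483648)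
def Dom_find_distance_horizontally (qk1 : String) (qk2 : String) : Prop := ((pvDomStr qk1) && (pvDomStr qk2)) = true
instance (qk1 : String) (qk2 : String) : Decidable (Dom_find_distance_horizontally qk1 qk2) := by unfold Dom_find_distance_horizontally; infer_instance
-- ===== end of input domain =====

-- B: two independent Horner accumulations of the parity bits (left-to-right), abs of difference —
-- simpler than A's reverse + branch + signed sum of pow(2,i).

-- ===== PORT A =====
-- int(ch) for a single digit character; exact on Pre_ (digit chars), where Python returns the digit value.
def pvCharInt (c : Char) : Int := (c.toNat : Int) - 48

def find_distance_horizontally (qk1 : String) (qk2 : String) : Int :=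
  let m := min qk1.toList.length qk2.toList.length
  let t1 := (qk1.toList.take m).reverse
  let t2 := (qk2.toList.take m).reverse
  let distance := (List.range t1.length).foldl (fun d i =>
    if pvCharInt (t1.getD i '0') % 2 = 0 ∧ pvCharInt (t2.getD i '0') % 2 ≠ 0 then d + 2 ^ i
    else if pvCharInt (t1.getD i '0') % 2 ≠ 0 ∧ pvCharInt (t2.getD i '0') % 2 = 0 then d - 2 ^ i
    else d) 0
  |distance|

-- ===== PORT B =====
def pvHorner (l : List Char) : Int := l.foldl (fun x c => 2 * x + pvCharInt c % 2) 0

def find_distance_horizontally_alt (qk1 : String) (qk2 : String) : Int :=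
  let m := min qk1.toList.length qk2.toList.length
  let x1 := pvHorner (qk1.toList.take m)
  let x2 := pvHorner (qk2.toList.take m)
  |x1 - x2|

-- ===== PRECONDITION & SPEC =====
-- Python's int(ch) raises ValueError on any non-digit character among the compared (truncated) prefixes.
def Pre_find_distance_horizontally (qk1 : String) (qk2 : String) : Prop :=
  ((qk1.toList.take (min qk1.toList.length qk2.toList.length)).all Char.isDigit &&
   (qk2.toList.take (min qk1.toList.length qk2.toList.length)).all Char.isDigit) = true
instance (qk1 : String) (qk2 : String) : Decidable (Pre_find_distance_horizontally qk1 qk2) := by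
  unfold Pre_find_distance_horizontally; infer_instance

def pvWitness_find_distance_horizontally : String × String := ("01", "10")

def Spec_find_distance_horizontally (qk1 : String) (qk2 : String) (out : Int) : Prop := out = find_distance_horizontally_alt qk1 qk2
instance (qk1 : String) (qk2 : String) (out : Int) : Decidable (Spec_find_distance_horizontally qk1 qk2 out) := by unfold Spec_find_distance_horizontally; infer_instance

-- ===== CLAIM (what is proved, stated in full; the proofs are below) =====
def Claim_equal_find_distance_horizontally : Prop := ∀ (qk1 : String) (qk2 : String), Dom_find_distance_horizontally qk1 qk2 → Pre_find_distance_horizontally qk1 qk2 → Spec_find_distance_horizontally qk1 qk2 (find_distance_horizontally qk1 qk2)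

-- ===== LEMMAS AND PROOFS =====

-- position-weighted parity sum: Σ_{i<n} parity(l[i]) · 2^i
def pvS (l : List Char) (n : ℕ) : Int :=
  ∑ i ∈ Finset.range n, (pvCharInt (l.getD i '0') % 2) * 2 ^ i

theorem pv_par_cases (c : Char) : pvCharInt c % 2 = 0 ∨ pvCharInt c % 2 = 1 :=
  Int.emod_two_eq_zero_or_one _

theorem pv_foldA (t1 t2 : List Char) (n : ℕ) (d : Int) :
    (List.range n).foldl (fun d i =>
      if pvCharInt (t1.getD i '0') % 2 = 0 ∧ pvCharInt (t2.getD i '0') % 2 ≠ 0 then d + 2 ^ i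
      else if pvCharInt (t1.getD i '0') % 2 ≠ 0 ∧ pvCharInt (t2.getD i '0') % 2 = 0 then d - 2 ^ i
      else d) d = d + (pvS t2 n - pvS t1 n) := by
  induction n generalizing d with
  | zero => simp [pvS]
  | succ n ih =>
    rw [List.range_succ, List.foldl_append, ih]
    have hs1 : pvS t1 (n + 1) = pvS t1 n + (pvCharInt (t1.getD n '0') % 2) * 2 ^ n := by
      simp [pvS, Finset.sum_range_succ]
    have hs2 : pvS t2 (n + 1) = pvS t2 n + (pvCharInt (t2.getD n '0') % 2) * 2 ^ n := by
      simp [pvS, Finset.sum_range_succ]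
    simp only [List.foldl_cons, List.foldl_nil]
    rw [hs1, hs2]
    rcases pv_par_cases (t1.getD n '0') with h1 | h1 <;>
      rcases pv_par_cases (t2.getD n '0') with h2 | h2 <;>
      simp only [h1, h2] <;> norm_num <;> ring

theorem pv_horner_rev (l : List Char) : pvHorner l.reverse = pvS l l.length := by
  induction l with
  | nil => simp [pvHorner, pvS]
  | cons a l ih =>
    have hstep : pvHorner (l.reverse ++ [a]) = 2 * pvHorner l.reverse + pvCharInt a % 2 := by
      simp [pvHorner, List.foldl_append]
    rw [List.reverse_cons, hstep, ih]
    simp only [pvS, List.length_cons]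
    rw [Finset.sum_range_succ']
    simp only [List.getD_cons_succ, List.getD_cons_zero, pow_zero, mul_one, pow_succ]
    rw [Finset.mul_sum]
    congr 1
    exact Finset.sum_congr rfl fun i _ => by ring

-- ===== VERDICT (by name: the statement is the Claim_ definition above) =====
theorem find_distance_horizontally_spec : Claim_equal_find_distance_horizontally := by
  intro qk1 qk2 _ _
  unfold Spec_find_distance_horizontally find_distance_horizontally find_distance_horizontally_alt
  simp only []
  set m := min qk1.toList.length qk2.toList.length with hm
  set r1 := qk1.toList.take m with hr1
  set r2 := qk2.toList.take m with hr2
  have hl1 : r1.length = m := by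
    simp [hr1, hm, List.length_take]
  have hl2 : r2.length = m := by
    simp [hr2, hm, List.length_take]
  have hlen : r1.reverse.length = m := by simp [hl1]
  rw [hlen, pv_foldA]
  have h1 : pvHorner r1 = pvS r1.reverse m := by
    have := pv_horner_rev r1.reverse
    simpa [hlen] using this
  have h2 : pvHorner r2 = pvS r2.reverse m := by
    have := pv_horner_rev r2.reverse
    simpa [hl2] using this
  rw [h1, h2]
  rw [zero_add, abs_sub_comm]
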